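-- pv_equiv track=rewrite | github.com/th3cookie/StudyScripts | codewars/Multi-tap Keypad Text Entry on an Old Mobile Phone.py | presses
-- ===== SOURCE A (Python) =====
-- def presses(phrase):
--     key_one = ['1']
--     key_two = ['a', 'b', 'c', '2']
--     key_three = ['d','e','f','3']
--     key_four = ['g','h','i','4']
--     key_five = ['j', 'k', 'l', '5']
--     key_six = ['m', 'n', 'o', '6']
--     key_seven = ['p', 'q', 'r', 's', '7']
--     key_eigth = ['t', 'u', 'v', '8']
--     key_nine = ['w', 'x', 'y', 'z', '9']
--     key_zero = [' ', '0']
--     key_star = ['*']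
--     key_hash = ['#']
--
--     sum = 0
--     new = phrase.lower()
--     for letter in new:
--         if letter in key_one:
--             sum += key_one.index(letter) + 1
--         elif letter in key_two:
--             sum += key_two.index(letter) + 1
--         elif letter in key_three:
--             sum += key_three.index(letter) + 1
--         elif letter in key_four:
--             sum += key_four.index(letter) + 1
--         elif letter in key_five:
--             sum += key_five.index(letter) + 1
--         elif letter in key_six:
--             sum += key_six.index(letter) + 1
--         elif letter in key_seven:
--             sum += key_seven.index(letter) + 1
--         elif letter in key_eigth:
--             sum += key_eigth.index(letter) + 1
--         elif letter in key_nine: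
--             sum += key_nine.index(letter) + 1
--         elif letter in key_zero:
--             sum += key_zero.index(letter) + 1
--         elif letter in key_star:
--             sum += key_star.index(letter) + 1
--         elif letter in key_hash:
--             sum += key_hash.index(letter) + 1
--     return sum
-- ===== SOURCE B (Python) =====
-- def _press(c):
--     # closed-form press count from the character code: no tables, no scans
--     o = ord(c)
--     if 97 <= o <= 122:            # a..z
--         i = o - 97
--         if i < 15:                # a..o: keys 2-6 hold three letters each
--             return i % 3 + 1
--         if i < 19:                # p q r s
--             return i - 14
--         if i < 22:                # t u v
--             return i - 18
--         return i - 21             # w x y z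
--     if 48 <= o <= 57:             # digits: last slot of their key
--         if o == 48:
--             return 2              # '0' after space
--         if o == 49:
--             return 1              # '1' alone
--         return 5 if o in (55, 57) else 4   # '7','9' follow four letters
--     if c in ' *#':
--         return 1
--     return 0
--
-- def presses(phrase):
--     return sum(_press(c) for c in phrase.lower())
-- ===== Notes on version B (the rewrite author's own statement) =====
-- stated objective: alternative
-- what changed: Replaces A's twelve key-lists with membership tests and .index scans by a per-character arithmetic closed form computed directly from the character code (offset within the letter block, digit slot), summed over the lowercased phrase.
import Mathlib
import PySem

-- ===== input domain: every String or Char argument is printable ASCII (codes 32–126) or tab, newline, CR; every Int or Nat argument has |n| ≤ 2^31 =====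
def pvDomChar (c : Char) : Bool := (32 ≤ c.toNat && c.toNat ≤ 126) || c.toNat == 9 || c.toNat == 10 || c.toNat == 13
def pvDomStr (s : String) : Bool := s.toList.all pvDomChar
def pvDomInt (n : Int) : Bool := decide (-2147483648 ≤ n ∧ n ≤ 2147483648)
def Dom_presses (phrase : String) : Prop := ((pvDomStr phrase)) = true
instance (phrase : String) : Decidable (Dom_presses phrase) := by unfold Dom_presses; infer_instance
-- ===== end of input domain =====

-- B replaces A's twelve key-lists with membership tests and .index scans by an
-- arithmetic closed form computed from each character's code (objective: alternative).

-- ===== PORT A =====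
-- A's key lists (locals in A, lifted to helpers) and A's loop body
def key_one : List Char := ['1']
def key_two : List Char := ['a', 'b', 'c', '2']
def key_three : List Char := ['d', 'e', 'f', '3']
def key_four : List Char := ['g', 'h', 'i', '4']
def key_five : List Char := ['j', 'k', 'l', '5']
def key_six : List Char := ['m', 'n', 'o', '6']
def key_seven : List Char := ['p', 'q', 'r', 's', '7']
def key_eigth : List Char := ['t', 'u', 'v', '8']
def key_nine : List Char := ['w', 'x', 'y', 'z', '9']
def key_zero : List Char := [' ', '0']
def key_star : List Char := ['*']
def key_hash : List Char := ['#']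

def pressesStep (sum : Int) (letter : Char) : Int :=
  if letter ∈ key_one then sum + (((PySem.List.index? key_one letter).getD 0 : Int) + 1)
  else if letter ∈ key_two then sum + (((PySem.List.index? key_two letter).getD 0 : Int) + 1)
  else if letter ∈ key_three then sum + (((PySem.List.index? key_three letter).getD 0 : Int) + 1)
  else if letter ∈ key_four then sum + (((PySem.List.index? key_four letter).getD 0 : Int) + 1)
  else if letter ∈ key_five then sum + (((PySem.List.index? key_five letter).getD 0 : Int) + 1)
  else if letter ∈ key_six then sum + (((PySem.List.index? key_six letter).getD 0 : Int) + 1)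
  else if letter ∈ key_seven then sum + (((PySem.List.index? key_seven letter).getD 0 : Int) + 1)
  else if letter ∈ key_eigth then sum + (((PySem.List.index? key_eigth letter).getD 0 : Int) + 1)
  else if letter ∈ key_nine then sum + (((PySem.List.index? key_nine letter).getD 0 : Int) + 1)
  else if letter ∈ key_zero then sum + (((PySem.List.index? key_zero letter).getD 0 : Int) + 1)
  else if letter ∈ key_star then sum + (((PySem.List.index? key_star letter).getD 0 : Int) + 1)
  else if letter ∈ key_hash then sum + (((PySem.List.index? key_hash letter).getD 0 : Int) + 1)
  else sum

def presses (phrase : String) : Int :=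
  (PySem.Str.lower phrase).toList.foldl pressesStep 0

-- ===== PORT B =====
-- _press(c): closed-form press count from the character code (Source B)
def pvPress (c : Char) : Int :=
  let o : Int := c.toNat
  if 97 ≤ o ∧ o ≤ 122 then
    let i := o - 97
    if i < 15 then PySem.Int.mod i 3 + 1
    else if i < 19 then i - 14
    else if i < 22 then i - 18
    else i - 21
  else if 48 ≤ o ∧ o ≤ 57 then
    if o = 48 then 2
    else if o = 49 then 1
    else if o = 55 ∨ o = 57 then 5 else 4
  else if c ∈ [' ', '*', '#'] then 1
  else 0

def presses_alt (phrase : String) : Int :=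
  (PySem.Str.lower phrase).toList.foldl (fun acc c => acc + pvPress c) 0

-- ===== PRECONDITION & SPEC =====
def Spec_presses (phrase : String) (out : Int) : Prop := out = presses_alt phrase
instance (phrase : String) (out : Int) : Decidable (Spec_presses phrase out) := by unfold Spec_presses; infer_instance

-- ===== CLAIM (what is proved, stated in full; the proofs are below) =====
def Claim_equal_presses : Prop := ∀ (phrase : String), Dom_presses phrase → Spec_presses phrase (presses phrase)

-- ===== LEMMAS AND PROOFS =====

set_option maxHeartbeats 1000000 in
lemma pressesStep_shift (acc : Int) (c : Char) :
    pressesStep acc c = acc + pressesStep 0 c := by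
  unfold pressesStep
  by_cases h1 : c ∈ key_one <;> (try simp only [h1, if_true, if_false]) <;>
  by_cases h2 : c ∈ key_two <;> (try simp only [h2, if_true, if_false]) <;>
  by_cases h3 : c ∈ key_three <;> (try simp only [h3, if_true, if_false]) <;>
  by_cases h4 : c ∈ key_four <;> (try simp only [h4, if_true, if_false]) <;>
  by_cases h5 : c ∈ key_five <;> (try simp only [h5, if_true, if_false]) <;>
  by_cases h6 : c ∈ key_six <;> (try simp only [h6, if_true, if_false]) <;>
  by_cases h7 : c ∈ key_seven <;> (try simp only [h7, if_true, if_false]) <;>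
  by_cases h8 : c ∈ key_eigth <;> (try simp only [h8, if_true, if_false]) <;>
  by_cases h9 : c ∈ key_nine <;> (try simp only [h9, if_true, if_false]) <;>
  by_cases h10 : c ∈ key_zero <;> (try simp only [h10, if_true, if_false]) <;>
  by_cases h11 : c ∈ key_star <;> (try simp only [h11, if_true, if_false]) <;>
  by_cases h12 : c ∈ key_hash <;> (try simp only [h12, if_true, if_false]) <;>
  omega

set_option maxRecDepth 16000 in
set_option maxHeartbeats 1000000 in
lemma pressesStep_eq_press_ofNat : ∀ n : Nat, n < 128 →
    pressesStep 0 (Char.ofNat n) = pvPress (Char.ofNat n) := by decide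

set_option maxRecDepth 4000 in
lemma lowerChar_lt_128 : ∀ n : Nat, n < 128 →
    (PySem.Chars.lowerChar (Char.ofNat n)).toNat < 128 := by decide

lemma step_eq (acc : Int) (c : Char) (h : c.toNat < 128) :
    pressesStep acc c = acc + pvPress c := by
  have h2 := pressesStep_eq_press_ofNat c.toNat h
  rw [Char.ofNat_toNat] at h2
  rw [pressesStep_shift, h2]

-- ===== VERDICT (by name: the statement is the Claim_ definition above) =====
theorem presses_spec : Claim_equal_presses := by
  intro phrase hdom
  unfold Spec_presses presses presses_alt
  apply PySem.List.foldl_congr_mem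
  intro acc x hx
  apply step_eq
  rw [PySem.Str.toList_lower, PySem.Chars.lower, List.mem_map] at hx
  obtain ⟨c, hc, rfl⟩ := hx
  have hcd : pvDomChar c = true := by
    have := hdom
    unfold Dom_presses pvDomStr at this
    exact List.all_eq_true.mp this c hc
  have hlt : c.toNat < 128 := by
    unfold pvDomChar at hcd
    simp only [Bool.or_eq_true, Bool.and_eq_true, decide_eq_true_eq, beq_iff_eq] at hcd
    omega
  have := lowerChar_lt_128 c.toNat hlt
  rwa [Char.ofNat_toNat] at this
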